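-- pv_equiv track=rewrite | github.com/neil-vass/advent2020 | day-6.py | group_answer
-- ===== SOURCE A (Python) =====
-- def group_answer(data):
--     answer = None
--     for ln in data:
--         if answer is None:
--             answer = set(ln.rstrip())
--         else:
--             answer = answer & set(ln.rstrip())
--     return answer
-- ===== SOURCE B (Python) =====
-- def group_answer(data):
--     lines = [ln.rstrip() for ln in data]
--     if not lines:
--         return None
--     pool = []
--     for ln in lines:
--         pool.extend(dict.fromkeys(ln))
--     counts = {}
--     for c in pool:
--         counts[c] = counts.get(c, 0) + 1
--     return {c for c in pool if counts[c] == len(lines)}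
-- ===== Notes on version B (the rewrite author's own statement) =====
-- stated objective: alternative
-- what changed: B replaces A's running set intersection with a frequency table: it pools each line's deduplicated characters, counts them in one dict pass, and keeps exactly the characters whose count equals the number of lines.
import Mathlib
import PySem

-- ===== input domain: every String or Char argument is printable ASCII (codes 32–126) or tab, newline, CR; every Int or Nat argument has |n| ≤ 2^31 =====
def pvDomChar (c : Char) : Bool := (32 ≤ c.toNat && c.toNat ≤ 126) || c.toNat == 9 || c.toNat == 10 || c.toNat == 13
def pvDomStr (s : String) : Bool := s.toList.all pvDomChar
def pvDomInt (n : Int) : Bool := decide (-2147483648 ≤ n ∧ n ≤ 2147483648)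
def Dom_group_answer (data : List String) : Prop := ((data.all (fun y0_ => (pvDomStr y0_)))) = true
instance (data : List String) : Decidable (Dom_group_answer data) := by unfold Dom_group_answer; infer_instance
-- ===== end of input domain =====

-- B replaces A's running set intersection with a pooled per-line-deduplicated character list
-- plus a count-equals-number-of-lines filter (alternative decomposition, same result).

-- ===== PORT A =====
def group_answer (data : List String) : Option (List String) :=
  data.foldl (fun answer ln =>
    match answer with
    | none => some (PySem.Set.ofList ((PySem.Str.rstrip ln).toList.map (fun c => String.ofList [c])))
    | some s => some (PySem.Set.inter s (PySem.Set.ofList ((PySem.Str.rstrip ln).toList.map (fun c => String.ofList [c])))))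
    none

-- ===== PORT B =====
def group_answer_alt (data : List String) : Option (List String) :=
  let lines := data.map PySem.Str.rstrip
  if lines.isEmpty then none
  else
    let pool := lines.foldl (fun acc ln => acc ++ PySem.List.dedup (ln.toList.map (fun c => String.ofList [c]))) []
    let counts := pool.foldl (fun d c => d.insert c (d.getD c 0 + 1)) PySem.Dict.empty
    -- counts[c]: every c drawn from pool is a key of counts, so the getD default is never used (exact)
    some (PySem.Set.ofList (pool.filter (fun c => counts.getD c 0 == PySem.List.len lines)))

-- ===== PRECONDITION & SPEC =====
def Spec_group_answer (data : List String) (out : Option (List String)) : Prop := out = group_answer_alt data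
instance (data : List String) (out : Option (List String)) : Decidable (Spec_group_answer data out) := by unfold Spec_group_answer; infer_instance

-- ===== CLAIM (what is proved, stated in full; the proofs are below) =====
def Claim_equal_group_answer : Prop := ∀ (data : List String), Dom_group_answer data → Spec_group_answer data (group_answer data)

-- ===== LEMMAS AND PROOFS =====

-- the (deduplicated) per-line character set both programs work with
def pvChars (ln : String) : List String :=
  (PySem.Str.rstrip ln).toList.map (fun c => String.ofList [c])

theorem pv_a_shape (ds : List String) (s : List String) :
    ds.foldl (fun answer ln =>
      match answer with
      | none => some (PySem.Set.ofList (pvChars ln))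
      | some s => some (PySem.Set.inter s (PySem.Set.ofList (pvChars ln)))) (some s)
    = some (ds.foldl (fun s ln => PySem.Set.inter s (PySem.Set.ofList (pvChars ln))) s) := by
  induction ds generalizing s with
  | nil => rfl
  | cons d ds ih => simp [List.foldl_cons, ih]

theorem pv_inter_fold (L : List String) (S : List String) :
    L.foldl (fun s ln => PySem.Set.inter s (PySem.Set.ofList (pvChars ln))) S
    = S.filter (fun c => L.all (fun ln => (PySem.Set.ofList (pvChars ln)).contains c)) := by
  induction L generalizing S with
  | nil => simp
  | cons l L ih =>
      rw [List.foldl_cons, ih, PySem.Set.inter, List.filter_filter]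
      simp [Bool.and_comm]

theorem pv_ofList_append_subset (l t : List String) (hnd : l.Nodup)
    (h : ∀ x ∈ t, x ∈ l) : PySem.Set.ofList (l ++ t) = l := by
  rw [PySem.Set.ofList, List.foldl_append, ← PySem.Set.ofList,
      PySem.Set.ofList_eq_self_of_nodup l hnd]
  induction t with
  | nil => rfl
  | cons x t ih =>
      rw [List.foldl_cons, PySem.Set.add_of_mem (h x (List.mem_cons_self))]
      exact ih (fun y hy => h y (List.mem_cons_of_mem x hy))

theorem pv_pool_eq (lines : List String) :
    lines.foldl (fun acc ln => acc ++ PySem.List.dedup (ln.toList.map (fun c => String.ofList [c]))) []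
    = (lines.map (fun ln => PySem.List.dedup (ln.toList.map (fun c => String.ofList [c])))).flatten := by
  simp

theorem pv_count_flatten (Cs : List (List String)) (c : String)
    (hnd : ∀ C ∈ Cs, C.Nodup) :
    (Cs.flatten.count c) = Cs.countP (fun C => C.contains c) := by
  rw [List.count_flatten]
  induction Cs with
  | nil => rfl
  | cons C Cs ih =>
      rw [List.map_cons, List.sum_cons, List.countP_cons,
          ih (fun C hC => hnd C (List.mem_cons_of_mem _ hC)),
          List.Nodup.count (hnd C List.mem_cons_self)]
      by_cases hm : c ∈ C <;> simp [hm, Nat.add_comm]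

theorem pv_getD_countFold (pool : List String) (c : String) :
    (pool.foldl (fun d x => d.insert x (d.getD x 0 + 1)) PySem.Dict.empty).getD c 0
    = (pool.count c : Int) := by
  have h := PySem.Dict.getD_counter pool c
  simp only [PySem.Dict.counter, PySem.Dict.modify] at h
  exact h

theorem pv_pred (Cs : List (List String)) (hnd : ∀ C ∈ Cs, C.Nodup) (c : String) :
    ((Cs.flatten.count c : Int) == (Cs.length : Int))
    = Cs.all (fun C => C.contains c) := by
  rw [Bool.eq_iff_iff, pv_count_flatten Cs c hnd]
  simp [List.countP_eq_length, List.all_eq_true]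

theorem pv_main (d : String) (ds : List String) :
    group_answer (d :: ds) = group_answer_alt (d :: ds) := by
  unfold group_answer group_answer_alt
  simp only [List.foldl_cons, ← pvChars.eq_def]
  rw [pv_a_shape, pv_inter_fold]
  simp only [List.map_cons, List.isEmpty_cons, Bool.false_eq_true, if_false,
    pv_pool_eq, List.map_map, Function.comp_def, ← pvChars.eq_def]
  simp only [pv_getD_countFold]
  have hnd : ∀ C ∈ (PySem.List.dedup (pvChars d) :: List.map (fun x => PySem.List.dedup (pvChars x)) ds),
      C.Nodup := by
    intro C hC
    rcases List.mem_cons.1 hC with h | h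
    · subst h; exact PySem.List.nodup_dedup _
    · obtain ⟨x, _, rfl⟩ := List.mem_map.1 h; exact PySem.List.nodup_dedup _
  have hlen : PySem.List.len (PySem.Str.rstrip d :: List.map PySem.Str.rstrip ds)
      = (((PySem.List.dedup (pvChars d) :: List.map (fun x => PySem.List.dedup (pvChars x)) ds)).length : Int) := by
    simp [PySem.List.len]
  rw [hlen]
  simp only [pv_pred _ hnd]
  rw [List.flatten_cons, List.filter_append,
      pv_ofList_append_subset _ _
        (List.Nodup.filter _ (PySem.List.nodup_dedup _))
        (by
          intro x hx
          have hq := List.of_mem_filter hx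
          have hmem : x ∈ PySem.List.dedup (pvChars d) := by
            have := (List.all_eq_true.1 hq) _ List.mem_cons_self
            simpa using this
          exact List.mem_filter.2 ⟨hmem, hq⟩)]
  simp only [PySem.List.dedup_eq_ofList]
  rw [List.filter_congr]
  intro c hc
  simp [List.all_map, hc, Function.comp_def, PySem.Set.mem_ofList]

-- ===== VERDICT (by name: the statement is the Claim_ definition above) =====
theorem group_answer_spec : Claim_equal_group_answer := by
  intro data _
  unfold Spec_group_answer
  cases data with
  | nil => rfl
  | cons d ds => exact pv_main d ds
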